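-- pv_equiv track=rewrite | github.com/HungN0102/Leetcode | Algorithms/problems/Arrays/Minimum characters for words.py | minimumCharactersForWords
-- ===== SOURCE A (Python) =====
-- def minimumCharactersForWords(words):
--     hashmap = {}
--     for word in words:
--         wordFrequency = countFrequency(word)
--         for k in wordFrequency:
--             if k not in hashmap:
--                 hashmap[k] = wordFrequency[k]
--                 continue
--             hashmap[k] = max(hashmap[k], wordFrequency[k])
--
--     results = []
--     for k, v in hashmap.items():
--         for _ in range(v):
--             results.append(k)
--     return results
--
-- def countFrequency(word):
--     hashmap = {}
--     for char in word:
--         if char not in hashmap: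
--             hashmap[char] = 0
--         hashmap[char] += 1
--     return hashmap
-- ===== SOURCE B (Python) =====
-- def minimumCharactersForWords(words):
--     # distinct characters in first-seen order, then each repeated by its
--     # maximum per-word count
--     order = dict.fromkeys(c for word in words for c in word)
--     return [c for c in order
--               for _ in range(max(word.count(c) for word in words))]
-- ===== Notes on version B (the rewrite author's own statement) =====
-- stated objective: simpler
-- what changed: B drops A's per-word frequency dicts and the running max-merge dict entirely: it takes the distinct characters in first-seen order (dict.fromkeys) and emits each one repeated by the maximum of its per-word counts (max of word.count(c)), as one comprehension.
import Mathlib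
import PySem

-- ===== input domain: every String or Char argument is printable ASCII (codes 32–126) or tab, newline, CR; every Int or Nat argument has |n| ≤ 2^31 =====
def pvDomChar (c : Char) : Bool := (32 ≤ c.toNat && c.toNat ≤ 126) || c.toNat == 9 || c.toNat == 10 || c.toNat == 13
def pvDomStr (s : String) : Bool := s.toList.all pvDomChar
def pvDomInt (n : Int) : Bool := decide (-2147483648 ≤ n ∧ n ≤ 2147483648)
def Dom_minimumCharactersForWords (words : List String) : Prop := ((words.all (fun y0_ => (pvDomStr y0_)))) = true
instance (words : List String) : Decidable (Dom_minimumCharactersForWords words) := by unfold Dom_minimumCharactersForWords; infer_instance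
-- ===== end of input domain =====

-- B replaces A's two hand-written dict-accumulation loops (per-word frequency dicts
-- merged by running max) by "distinct chars in first-seen order, each repeated by the
-- max of its per-word counts" (simpler; same return value).

-- ===== PORT A =====
def countFrequency (word : String) : PySem.Dict Char Int :=
  word.toList.foldl (fun hashmap char =>
    -- if char not in hashmap: hashmap[char] = 0;  hashmap[char] += 1
    let h1 := if hashmap.contains char then hashmap else hashmap.insert char 0
    h1.insert char (h1.getD char 0 + 1)) PySem.Dict.empty

def minimumCharactersForWords (words : List String) : List String :=
  let hashmap := words.foldl (fun hashmap word =>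
    let wordFrequency := countFrequency word
    wordFrequency.keys.foldl (fun hashmap k =>
      if hashmap.contains k = false then
        hashmap.insert k (wordFrequency.getD k 0)       -- wordFrequency[k]: k is a key, getD is exact
      else
        hashmap.insert k (max (hashmap.getD k 0) (wordFrequency.getD k 0))) hashmap)
    PySem.Dict.empty
  hashmap.items.foldl (fun results kv =>
    (PySem.List.pyRange 0 kv.2 1).foldl (fun results _ => results ++ [String.ofList [kv.1]]) results) []

-- ===== PORT B =====
-- order = dict.fromkeys(c for word in words for c in word)
-- return [c for c in order for _ in range(max(word.count(c) for word in words))]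
def minimumCharactersForWords_alt (words : List String) : List String :=
  let order := PySem.List.dedup (words.flatMap (fun word => word.toList))
  order.flatMap (fun c =>
    -- max(...) over a nonempty generator (c comes from some word, so words ≠ []);
    -- the .getD 0 arm of the Option is never reached
    (PySem.List.pyRange 0
        ((PySem.List.max? (words.map (fun word => (PySem.Str.count word (String.ofList [c]) : Int)))
            (fun x => x)).getD 0) 1).map (fun _ => String.ofList [c]))

-- ===== PRECONDITION & SPEC =====
def Spec_minimumCharactersForWords (words : List String) (out : List String) : Prop := out = minimumCharactersForWords_alt words
instance (words : List String) (out : List String) : Decidable (Spec_minimumCharactersForWords words out) := by unfold Spec_minimumCharactersForWords; infer_instance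

-- ===== CLAIM (what is proved, stated in full; the proofs are below) =====
def Claim_equal_minimumCharactersForWords : Prop := ∀ (words : List String), Dom_minimumCharactersForWords words → Spec_minimumCharactersForWords words (minimumCharactersForWords words)

-- ===== LEMMAS AND PROOFS =====

-- word.count(c) for a single character c is the character count
theorem go_single (c : Char) : ∀ (fuel : Nat) (l : List Char) (acc : Nat), l.length ≤ fuel →
    PySem.Chars.count.go [c] fuel l acc = acc + l.count c := by
  intro fuel
  induction fuel with
  | zero => intro l acc h; rw [List.length_eq_zero_iff.mp (Nat.le_zero.mp h)]; simp [PySem.Chars.count.go]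
  | succ n ih =>
    intro l acc h
    cases l with
    | nil => simp [PySem.Chars.count.go]
    | cons x t =>
      simp only [PySem.Chars.count.go, List.isPrefixOf, List.length_cons] at *
      by_cases hx : c = x
      · subst hx
        simp only [BEq.rfl, Bool.true_and, if_true]
        norm_num
        rw [ih t (acc+1) (by omega)]
        omega
      · rw [if_neg (by simp [hx]), ih t acc (by omega), List.count_cons_of_ne (by exact fun e => hx e.symm)]

theorem count_single (l : List Char) (c : Char) : PySem.Chars.count l [c] = l.count c := by
  unfold PySem.Chars.count
  simp [go_single c l.length l 0 le_rfl]

-- appending a constant singleton once per element of a list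
theorem foldl_append_const {α β : Type} (l : List α) (res : List β) (s : β) :
    l.foldl (fun r _ => r ++ [s]) res = res ++ List.replicate l.length s := by
  induction l generalizing res with
  | nil => simp
  | cons x t ih =>
    rw [List.foldl_cons, ih, List.append_assoc]
    rfl

theorem pyRange_rep_fold {β : Type} (v : Int) (res : List β) (s : β) :
    (PySem.List.pyRange 0 v 1).foldl (fun r _ => r ++ [s]) res = res ++ List.replicate v.toNat s := by
  rw [foldl_append_const, PySem.List.length_pyRange_one]
  norm_num

theorem pyRange_rep_map {β : Type} (v : Int) (s : β) :
    (PySem.List.pyRange 0 v 1).map (fun _ => s) = List.replicate v.toNat s := by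
  rw [List.eq_replicate_iff]
  constructor
  · rw [List.length_map, PySem.List.length_pyRange_one]; norm_num
  · intro b hb; simp at hb; exact hb.2

-- A's countFrequency is collections.Counter
theorem cf_eq (w : String) : countFrequency w = PySem.Dict.counter w.toList := by
  unfold countFrequency
  rw [← PySem.Dict.foldl_insert_getD_add_one_eq_counter]
  congr 1
  funext d c
  by_cases h : d.contains c
  · simp only [h, if_true]
  · have hf : d.contains c = false := Bool.eq_false_iff.mpr h
    simp only [hf, Bool.false_eq_true, if_false, PySem.Dict.getD_insert_self,
      PySem.Dict.insert_insert_self, PySem.Dict.getD_of_not_contains d 0 hf]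

-- the merge of one word's counter into the running dict, normalised to a single insert
def mstep (g : Char → Int) : PySem.Dict Char Int → Char → PySem.Dict Char Int :=
  fun h k => h.insert k (max (h.getD k 0) (g k))

def mergeW (h : PySem.Dict Char Int) (w : String) : PySem.Dict Char Int :=
  (PySem.List.dedup w.toList).foldl (mstep (fun k => (w.toList.count k : Int))) h

theorem stepA_eq (w : String) :
    (fun (hashmap : PySem.Dict Char Int) k =>
      if hashmap.contains k = false then hashmap.insert k ((w.toList.count k : Int))
      else hashmap.insert k (max (hashmap.getD k 0) ((w.toList.count k : Int))))
    = mstep (fun k => (w.toList.count k : Int)) := by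
  funext h k
  by_cases hc : h.contains k
  · rw [if_neg (by simp [hc])]; rfl
  · have hf : h.contains k = false := Bool.eq_false_iff.mpr hc
    rw [if_pos hf]
    simp only [mstep]
    rw [PySem.Dict.getD_of_not_contains h 0 hf, max_eq_right (Int.natCast_nonneg _)]

theorem F_eq_mergeW :
    (fun (hashmap : PySem.Dict Char Int) word =>
      (countFrequency word).keys.foldl (fun hashmap k =>
        if hashmap.contains k = false then hashmap.insert k ((countFrequency word).getD k 0)
        else hashmap.insert k (max (hashmap.getD k 0) ((countFrequency word).getD k 0))) hashmap)
    = mergeW := by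
  funext h w
  simp only [cf_eq, PySem.Dict.getD_counter, PySem.Dict.keys_counter, ← PySem.List.dedup_eq_ofList]
  rw [mergeW, stepA_eq]

theorem getD_mstep_fold (g : Char → Int) :
    ∀ (l : List Char) (h : PySem.Dict Char Int) (c : Char),
      (l.foldl (mstep g) h).getD c 0 = if c ∈ l then max (h.getD c 0) (g c) else h.getD c 0 := by
  intro l
  induction l with
  | nil => simp
  | cons k t ih =>
    intro h c
    simp only [List.foldl_cons, ih, mstep, PySem.Dict.getD_insert, List.mem_cons]
    by_cases hk : c = k
    · subst hk
      by_cases ht : c ∈ t <;> simp [ht]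
    · by_cases ht : c ∈ t <;> simp [ht, hk]

theorem getD_mergeW_fold :
    ∀ (ws : List String) (h : PySem.Dict Char Int) (c : Char), 0 ≤ h.getD c 0 →
      (ws.foldl mergeW h).getD c 0
        = (ws.map (fun w => (w.toList.count c : Int))).foldl max (h.getD c 0) := by
  intro ws
  induction ws with
  | nil => simp
  | cons w t ih =>
    intro h c h0
    have hm : (mergeW h w).getD c 0 = max (h.getD c 0) ((w.toList.count c : Int)) := by
      rw [mergeW, getD_mstep_fold]
      by_cases hc : c ∈ w.toList
      · simp [hc]
      · simp only [PySem.List.mem_dedup, hc, if_false,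
          List.count_eq_zero_of_not_mem hc, Nat.cast_zero]
        omega
    rw [List.foldl_cons, List.map_cons, List.foldl_cons, ih _ c (by rw [hm]; positivity), hm]

theorem update_dedup {α : Type} [BEq α] [LawfulBEq α] (s xs : List α) :
    PySem.Set.update s (PySem.List.dedup xs) = PySem.Set.update s xs := by
  rw [PySem.Set.update_eq_append_filter, PySem.Set.update_eq_append_filter,
    PySem.List.dedup_eq_ofList, PySem.Set.ofList_ofList]

theorem keys_mergeW (h : PySem.Dict Char Int) (w : String) :
    (mergeW h w).keys = PySem.Set.update h.keys w.toList := by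
  unfold mergeW mstep
  rw [PySem.Dict.keys_foldl_insert, update_dedup]

theorem keys_mergeW_fold :
    ∀ (ws : List String) (h : PySem.Dict Char Int),
      (ws.foldl mergeW h).keys = PySem.Set.update h.keys (ws.flatMap (fun w => w.toList)) := by
  intro ws
  induction ws with
  | nil => simp
  | cons w t ih =>
    intro h
    rw [List.foldl_cons, ih, keys_mergeW, List.flatMap_cons, ← PySem.Set.update_append]

-- ===== VERDICT (by name: the statement is the Claim_ definition above) =====
theorem minimumCharactersForWords_spec : Claim_equal_minimumCharactersForWords := by
  intro words _
  unfold Spec_minimumCharactersForWords minimumCharactersForWords minimumCharactersForWords_alt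
  rw [F_eq_mergeW]
  set M := words.foldl mergeW PySem.Dict.empty with hM
  have keysM : M.keys = PySem.List.dedup (words.flatMap (fun w => w.toList)) := by
    rw [hM, keys_mergeW_fold, PySem.Dict.keys_empty, PySem.Set.update_nil_left,
      PySem.List.dedup_eq_ofList]
  have nodupM : M.keys.Nodup := by rw [keysM]; exact PySem.List.nodup_dedup _
  have getDM : ∀ c, M.getD c 0 = (words.map (fun w => (w.toList.count c : Int))).foldl max 0 := by
    intro c
    rw [hM, getD_mergeW_fold words PySem.Dict.empty c (by simp), PySem.Dict.getD_empty]
  -- A's output loop, normalised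
  have hstep : (fun (results : List String) (kv : Char × Int) =>
      (PySem.List.pyRange 0 kv.2 1).foldl (fun results _ => results ++ [String.ofList [kv.1]]) results)
      = fun results kv => results ++ List.replicate kv.2.toNat (String.ofList [kv.1]) := by
    funext res kv; exact pyRange_rep_fold kv.2 res _
  rw [hstep, PySem.List.foldl_append_eq_flatMap, List.nil_append,
    PySem.Dict.items_eq_map_keys M nodupM 0, List.flatMap_map, keysM]
  -- B's side, normalised
  apply Eq.symm
  apply List.flatMap_congr
  intro c hc
  have hcw : c ∈ words.flatMap (fun w => w.toList) := (PySem.List.mem_dedup _ _).mp hc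
  rw [pyRange_rep_map]
  congr 2
  rw [getDM]
  have : ∀ w, (PySem.Str.count w (String.ofList [c]) : Int) = ((w.toList.count c : Nat) : Int) := by
    intro w; simp [pysem, count_single]
  simp only [this]
  obtain ⟨w, hw, -⟩ := List.exists_of_mem_flatMap hcw
  cases words with
  | nil => cases hw
  | cons w0 t =>
    rw [List.map_cons, PySem.List.max?_id_cons, Option.getD_some, List.foldl_cons,
      max_eq_right (Int.natCast_nonneg _)]
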